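-- pv_equiv track=rewrite | github.com/nickswanson15/CIS-211 | waldo.py | exists_col_all_waldo
-- ===== SOURCE A (Python) =====
-- Other = '.'
--
-- def exists_col_all_waldo(collection):
--
--     if len(collection) == 0:
--         return False
--
--     elif collection == [[], []]:
--         return False
--
--     else:
--
--         false0 = 0
--         false1 = 0
--         false2 = 0
--
--         col0 = [item[0] for item in collection]
--         col1 = [item[1] for item in collection]
--         col2 = [item[2] for item in collection]
--
--         for value in col0:
--             if value == Other:
--                 false0 = 1
--
--         for value in col1:
--             if value == Other:
--                 false1 = 1
--
--         for value in col2: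
--             if value == Other:
--                 false2 = 1
--
--         if false0 and false1 and false2 == 1:
--             return False
--         else:
--             return True
-- ===== SOURCE B (Python) =====
-- Other = '.'
--
-- def exists_col_all_waldo(collection):
--     if len(collection) == 0:
--         return False
--     if collection == [[], []]:
--         return False
--     return _search(collection, [0, 1, 2])
--
-- def _search(rows, missing):
--     # missing = columns still lacking a '.'; empty -> every column has one -> False
--     if not missing:
--         return False
--     if not rows:
--         return True
--     row = rows[0]
--     return _search(rows[1:], [c for c in missing if row[c] != Other])
-- ===== Notes on version B (the rewrite author's own statement) =====
-- stated objective: alternative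
-- what changed: Replaces the three column-list builds plus three separate full column scans by a recursive worklist search that carries the list of columns still lacking '.', shrinks it row by row, and terminates early once it empties.
import Mathlib
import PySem

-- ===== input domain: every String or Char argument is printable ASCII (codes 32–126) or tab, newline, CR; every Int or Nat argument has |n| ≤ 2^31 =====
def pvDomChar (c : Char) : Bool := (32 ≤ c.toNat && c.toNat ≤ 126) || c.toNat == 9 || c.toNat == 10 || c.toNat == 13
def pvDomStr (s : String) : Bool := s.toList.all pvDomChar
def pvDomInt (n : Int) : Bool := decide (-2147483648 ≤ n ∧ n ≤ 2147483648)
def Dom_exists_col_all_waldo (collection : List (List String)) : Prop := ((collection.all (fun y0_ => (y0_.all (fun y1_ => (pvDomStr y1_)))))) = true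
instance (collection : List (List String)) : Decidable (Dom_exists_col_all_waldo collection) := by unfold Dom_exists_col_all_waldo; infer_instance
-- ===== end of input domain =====

-- B replaces A's three column-list builds and three full column scans by a recursive
-- worklist search carrying the columns still lacking '.', with early termination;
-- same return value wherever A returns.

-- ===== PORT A =====
def exists_col_all_waldo (collection : List (List String)) : Bool :=
  if collection.length = 0 then false
  else if collection = [[], []] then false
  else
    let col0 := collection.map (fun item => PySem.List.pyGet? item 0)
    let col1 := collection.map (fun item => PySem.List.pyGet? item 1)
    let col2 := collection.map (fun item => PySem.List.pyGet? item 2)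
    let false0 := col0.foldl (fun a v => if v = some "." then (1 : Int) else a) 0
    let false1 := col1.foldl (fun a v => if v = some "." then (1 : Int) else a) 0
    let false2 := col2.foldl (fun a v => if v = some "." then (1 : Int) else a) 0
    if false0 ≠ 0 ∧ false1 ≠ 0 ∧ false2 = 1 then false else true

-- ===== PORT B =====
-- transliteration of Source B's _search
def waldoSearch (rows : List (List String)) (missing : List Int) : Bool :=
  if missing.isEmpty then false
  else
    match rows with
    | [] => true
    | row :: rest =>
        waldoSearch rest (missing.filter (fun c => !decide (PySem.List.pyGet? row c = some ".")))

def exists_col_all_waldo_alt (collection : List (List String)) : Bool :=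
  if collection.length = 0 then false
  else if collection = [[], []] then false
  else waldoSearch collection [0, 1, 2]

-- ===== PRECONDITION & SPEC =====
-- Pre_ excludes exactly the inputs on which A raises IndexError: collections containing a
-- row shorter than 3 that are not caught by A's two early-return guards.
def Pre_exists_col_all_waldo (collection : List (List String)) : Prop :=
  collection = [] ∨ collection = [[], []] ∨ ∀ row ∈ collection, 3 ≤ row.length
instance (collection : List (List String)) : Decidable (Pre_exists_col_all_waldo collection) := by unfold Pre_exists_col_all_waldo; infer_instance

def pvWitness_exists_col_all_waldo : List (List String) := [["W", ".", "W"], [".", "W", "W"]]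

def Spec_exists_col_all_waldo (collection : List (List String)) (out : Bool) : Prop := out = exists_col_all_waldo_alt collection
instance (collection : List (List String)) (out : Bool) : Decidable (Spec_exists_col_all_waldo collection out) := by unfold Spec_exists_col_all_waldo; infer_instance

-- ===== CLAIM (what is proved, stated in full; the proofs are below) =====
def Claim_equal_exists_col_all_waldo : Prop := ∀ (collection : List (List String)), Dom_exists_col_all_waldo collection → Pre_exists_col_all_waldo collection → Spec_exists_col_all_waldo collection (exists_col_all_waldo collection)

-- ===== LEMMAS AND PROOFS =====

-- A's flag loop: sets the Int flag to 1 iff some element matches '.'.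
theorem foldl_flag (xs : List (Option String)) (c : Int) :
    xs.foldl (fun a v => if v = some "." then (1 : Int) else a) c
      = if xs.any (fun v => decide (v = some ".")) then 1 else c := by
  induction xs generalizing c with
  | nil => simp
  | cons h t ih =>
    simp only [List.foldl_cons, List.any_cons, ih]
    by_cases h1 : h = some "." <;> simp [h1]

-- filtering the worklist by the head row turns the head disjunct of 'any' into 'all over filter'
theorem all_filter_head (m : List Int) (p q : Int → Bool) :
    (m.filter (fun c => !p c)).all q = m.all (fun c => p c || q c) := by
  induction m with
  | nil => rfl
  | cons h t ih =>
    by_cases hp : p h = true <;> simp [hp, ih]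

-- B's worklist search computes "not every column in the (nonempty) worklist has a '.' somewhere"
theorem waldoSearch_eq (rows : List (List String)) (m : List Int) (hm : m ≠ []) :
    waldoSearch rows m
      = !(m.all (fun c => rows.any (fun row => decide (PySem.List.pyGet? row c = some ".")))) := by
  induction rows generalizing m with
  | nil =>
    unfold waldoSearch
    cases m with
    | nil => exact absurd rfl hm
    | cons a t => simp
  | cons row rest ih =>
    unfold waldoSearch
    simp only [List.isEmpty_iff, if_neg hm]
    by_cases h0 : m.filter (fun c => !decide (PySem.List.pyGet? row c = some ".")) = []
    · rw [h0]
      unfold waldoSearch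
      simp only [List.isEmpty_nil, if_pos]
      have := all_filter_head m (fun c => decide (PySem.List.pyGet? row c = some "."))
        (fun c => rest.any (fun r => decide (PySem.List.pyGet? r c = some ".")))
      have hall : m.all (fun c => decide (PySem.List.pyGet? row c = some ".")
          || rest.any (fun r => decide (PySem.List.pyGet? r c = some "."))) = true := by
        rw [← this, h0]; rfl
      simp [List.any_cons, hall]
    · rw [ih _ h0, all_filter_head m (fun c => decide (PySem.List.pyGet? row c = some "."))]
      simp [List.any_cons]

-- ===== VERDICT (by name: the statement is the Claim_ definition above) =====
theorem exists_col_all_waldo_spec : Claim_equal_exists_col_all_waldo := by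
  intro collection _ _
  unfold Spec_exists_col_all_waldo exists_col_all_waldo exists_col_all_waldo_alt
  split_ifs with h1 h2
  · rfl
  · rfl
  · rw [waldoSearch_eq _ _ (by simp)]
    simp only [foldl_flag, List.any_map, Function.comp_def, List.all_cons, List.all_nil,
      Bool.and_true]
    cases h0 : collection.any (fun row => decide (PySem.List.pyGet? row (0:Int) = some ".")) <;>
    cases hA : collection.any (fun row => decide (PySem.List.pyGet? row (1:Int) = some ".")) <;>
    cases hB : collection.any (fun row => decide (PySem.List.pyGet? row (2:Int) = some ".")) <;>
    simp
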